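-- pv_equiv track=rewrite | github.com/ninepig/leecode_dd_2024 | company/zAmazon/oa/zmethodExplained/numIdleDriver.py | numIdleDrives
-- ===== SOURCE A (Python) =====
-- from typing import List
--
-- def numIdleDrives(x: List[int], y: List[int]) -> int:
--     hash_set = set()
--     assert len(x) == len(y)
--     col_ranges = {}
--     row_ranges = {}
--     for x_c, y_c in zip(x, y):
--         if x_c in col_ranges:
--             col_ranges[x_c].append(y_c)
--             col_ranges[x_c].sort()
--         else:
--             col_ranges[x_c] = [y_c]
--         if y_c in row_ranges:
--             row_ranges[y_c].append(x_c)
--             row_ranges[y_c].sort()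
--         else:
--             row_ranges[y_c] = [x_c]
--
--     active_cnt = 0
--     for x_c, y_c in zip(x, y):
--         is_active = False
--         if x_c == row_ranges[y_c][0] or x_c == row_ranges[y_c][-1]:
--             is_active = True
--         if y_c == col_ranges[x_c][0] or y_c == col_ranges[x_c][-1]:
--             is_active = True
--         if is_active:
--             active_cnt += 1
--     return len(x) - active_cnt
-- ===== SOURCE B (Python) =====
-- def numIdleDrives(x, y):
--     assert len(x) == len(y)
--     pts = list(zip(x, y))
--     idle = 0
--     for a, b in pts:
--         if (any(c == a and d < b for c, d in pts)
--                 and any(c == a and d > b for c, d in pts)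
--                 and any(d == b and c < a for c, d in pts)
--                 and any(d == b and c > a for c, d in pts)):
--             idle += 1
--     return idle
-- ===== Notes on version B (the rewrite author's own statement) =====
-- stated objective: alternative
-- what changed: B drops A's dictionaries of repeatedly re-sorted per-row/per-column buckets entirely and instead decides each point directly by four existential scans over the point list (is there a point strictly below/above in its column and strictly left/right in its row), counting the interior points.
import Mathlib
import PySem

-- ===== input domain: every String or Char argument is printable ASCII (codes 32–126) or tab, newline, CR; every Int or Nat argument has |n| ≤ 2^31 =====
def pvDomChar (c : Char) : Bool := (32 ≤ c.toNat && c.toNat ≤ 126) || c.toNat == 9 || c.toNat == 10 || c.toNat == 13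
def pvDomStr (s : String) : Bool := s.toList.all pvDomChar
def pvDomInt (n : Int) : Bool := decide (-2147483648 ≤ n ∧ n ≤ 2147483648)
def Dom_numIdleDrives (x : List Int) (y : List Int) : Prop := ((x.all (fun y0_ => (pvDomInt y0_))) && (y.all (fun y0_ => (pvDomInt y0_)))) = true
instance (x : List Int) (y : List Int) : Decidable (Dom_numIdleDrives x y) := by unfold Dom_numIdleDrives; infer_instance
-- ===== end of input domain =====

-- B drops A's dictionaries of repeatedly re-sorted per-row/per-column buckets and instead decides
-- each point directly by four existential scans over the point list, counting interior points;
-- equal return value proved on Pre_ (equal-length inputs).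

-- ===== PORT A =====
-- one dict-update step of A's first loop: append the new value and sort the bucket
def stepColA (d : PySem.Dict Int (List Int)) (k v : Int) : PySem.Dict Int (List Int) :=
  if d.contains k then d.insert k (PySem.List.sorted (d.getD k [] ++ [v]) (fun w => w) false)
  else d.insert k [v]

-- A's is_active test; Python indexes row_ranges[y_c][0]/[-1] — the key is always present and
-- the bucket nonempty, so comparing with pyGet? (none never equals some _) is exact
def activeA (rr cr : PySem.Dict Int (List Int)) (p : Int × Int) : Bool :=
  (PySem.List.pyGet? (rr.getD p.2 []) 0 == some p.1 || PySem.List.pyGet? (rr.getD p.2 []) (-1) == some p.1)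
  || (PySem.List.pyGet? (cr.getD p.1 []) 0 == some p.2 || PySem.List.pyGet? (cr.getD p.1 []) (-1) == some p.2)

def numIdleDrives (x : List Int) (y : List Int) : Int :=
  let pairs := x.zip y
  let ds := pairs.foldl (fun d p => (stepColA d.1 p.1 p.2, stepColA d.2 p.2 p.1))
    ((PySem.Dict.empty : PySem.Dict Int (List Int)), (PySem.Dict.empty : PySem.Dict Int (List Int)))
  let active := pairs.foldl (fun (acc : Int) p => if activeA ds.2 ds.1 p then acc + 1 else acc) 0
  (x.length : Int) - active

-- ===== PORT B =====
-- B's four generator-any tests: a point strictly below/above in its column, strictly left/right in its row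
def idleB (pts : List (Int × Int)) (a b : Int) : Bool :=
  pts.any (fun q => q.1 == a && decide (q.2 < b)) &&
  pts.any (fun q => q.1 == a && decide (b < q.2)) &&
  pts.any (fun q => q.2 == b && decide (q.1 < a)) &&
  pts.any (fun q => q.2 == b && decide (a < q.1))

def numIdleDrives_alt (x : List Int) (y : List Int) : Int :=
  let pts := x.zip y
  pts.foldl (fun (acc : Int) p => if idleB pts p.1 p.2 then acc + 1 else acc) 0

-- ===== PRECONDITION & SPEC =====
-- A asserts len(x) == len(y) and raises AssertionError otherwise; Pre_ excludes exactly that.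
def Pre_numIdleDrives (x : List Int) (y : List Int) : Prop := x.length = y.length
instance (x : List Int) (y : List Int) : Decidable (Pre_numIdleDrives x y) := by
  unfold Pre_numIdleDrives; infer_instance
def pvWitness_numIdleDrives : List Int × List Int := ([0, 2, 0], [1, 1, 3])

def Spec_numIdleDrives (x : List Int) (y : List Int) (out : Int) : Prop := out = numIdleDrives_alt x y
instance (x : List Int) (y : List Int) (out : Int) : Decidable (Spec_numIdleDrives x y out) := by
  unfold Spec_numIdleDrives; infer_instance

-- ===== CLAIM (what is proved, stated in full; the proofs are below) =====
def Claim_equal_numIdleDrives : Prop := ∀ (x : List Int) (y : List Int), Dom_numIdleDrives x y → Pre_numIdleDrives x y → Spec_numIdleDrives x y (numIdleDrives x y)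

-- ===== LEMMAS AND PROOFS =====

-- values inserted so far under key k, column side (x = k, collect y) / row side (y = k, collect x)
def valsC (k : Int) (ps : List (Int × Int)) : List Int := (ps.filter (fun p => p.1 == k)).map (·.2)
def valsR (k : Int) (ps : List (Int × Int)) : List Int := (ps.filter (fun p => p.2 == k)).map (·.1)

-- relation between A's bucket and the multiset of values vs inserted so far under one key
def RelA (vs : List Int) (o : Option (List Int)) : Prop :=
  match o with
  | none => vs = []
  | some l => l.Perm vs ∧ l.Pairwise (· ≤ ·)

lemma valsC_append (k : Int) (ps : List (Int × Int)) (p : Int × Int) :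
    valsC k (ps ++ [p]) = valsC k ps ++ (if p.1 == k then [p.2] else []) := by
  simp only [valsC, List.filter_append, List.map_append]
  by_cases h : p.1 == k <;> simp [h]

lemma valsR_append (k : Int) (ps : List (Int × Int)) (p : Int × Int) :
    valsR k (ps ++ [p]) = valsR k ps ++ (if p.2 == k then [p.1] else []) := by
  simp only [valsR, List.filter_append, List.map_append]
  by_cases h : p.2 == k <;> simp [h]

lemma pairwise_head_le {l : List Int} {m : Int} (hp : l.Pairwise (· ≤ ·))
    (hh : l.head? = some m) : ∀ y ∈ l, m ≤ y := by
  cases l with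
  | nil => simp at hh
  | cons a t =>
    simp at hh; subst hh
    intro y hy
    rcases List.mem_cons.mp hy with h | h
    · omega
    · exact (List.pairwise_cons.mp hp).1 y h

lemma pairwise_getLast_ge {l : List Int} {M : Int} (hp : l.Pairwise (· ≤ ·))
    (hh : l.getLast? = some M) : ∀ y ∈ l, y ≤ M := by
  induction l with
  | nil => simp at hh
  | cons a t ih =>
    cases t with
    | nil => simp at hh ⊢; omega
    | cons b t' =>
      rw [List.getLast?_cons_cons] at hh
      intro y hy
      rcases List.mem_cons.mp hy with h | h
      · subst h
        have hb : M ∈ b :: t' := List.mem_of_getLast? hh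
        exact (List.pairwise_cons.mp hp).1 M hb
      · exact ih (List.pairwise_cons.mp hp).2 hh y h

lemma head?_mem {l : List Int} {m : Int} (h : l.head? = some m) : m ∈ l := by
  cases l with
  | nil => simp at h
  | cons a t => simp at h; subst h; exact List.mem_cons_self

lemma getLast?_mem {l : List Int} {m : Int} (h : l.getLast? = some m) : m ∈ l :=
  List.mem_of_getLast? h

-- pyGet? at 0 on a list is head?
lemma pyGet_zero (l : List Int) : PySem.List.pyGet? l 0 = l.head? := by
  cases l with
  | nil => simp [PySem.List.pyGet?, PySem.List.pyIdx?]
  | cons a t => simp [PySem.List.pyGet?, PySem.List.pyIdx?]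

-- one dict-update step preserves the per-key relation
lemma step_dict (vs : Int → List Int) (dA : PySem.Dict Int (List Int)) (a b : Int)
    (h : ∀ k, RelA (vs k) (dA.get? k)) :
    ∀ k, RelA (vs k ++ if a == k then [b] else []) ((stepColA dA a b).get? k) := by
  intro k
  by_cases hk : k = a
  · subst hk
    have hrel := h k
    cases hA : dA.get? k with
    | none =>
      have hvs : vs k = [] := by rw [hA] at hrel; exact hrel
      have hcont : dA.contains k = false := by
        rw [PySem.Dict.contains_eq_isSome_get?, hA]; rfl
      simp only [stepColA, hcont, if_false, Bool.false_eq_true]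
      rw [PySem.Dict.get?_insert_self]
      exact ⟨by simp [hvs], by simp⟩
    | some l =>
      rw [hA] at hrel
      obtain ⟨hperm, hpw⟩ := hrel
      have hcont : dA.contains k = true := by
        rw [PySem.Dict.contains_eq_isSome_get?, hA]; rfl
      have hgd : dA.getD k [] = l := PySem.Dict.getD_of_get?_eq_some _ _ hA
      simp only [stepColA, hcont, if_true, hgd]
      rw [PySem.Dict.get?_insert_self]
      refine ⟨?_, ?_⟩
      · exact (PySem.List.sorted_perm _ _ _).trans (by simpa using hperm.append_right [b])
      · simpa using PySem.List.sorted_pairwise (l ++ [b]) (fun w => w)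
  · have hne : k ≠ a := hk
    have hA : (stepColA dA a b).get? k = dA.get? k := by
      unfold stepColA
      by_cases hc : dA.contains a = true <;>
        simp [hc, PySem.Dict.get?_insert, hne]
    have hak : (a == k) = false := by simp [Ne.symm hne]
    rw [hA, hak]
    simpa using h k

-- the invariant over A's building loop
def InvAt (ps : List (Int × Int))
    (dA : PySem.Dict Int (List Int) × PySem.Dict Int (List Int)) : Prop :=
  (∀ k, RelA (valsC k ps) (dA.1.get? k)) ∧ (∀ k, RelA (valsR k ps) (dA.2.get? k))

lemma step_preserves (ps : List (Int × Int)) (p : Int × Int)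
    (dA : PySem.Dict Int (List Int) × PySem.Dict Int (List Int))
    (h : InvAt ps dA) :
    InvAt (ps ++ [p]) (stepColA dA.1 p.1 p.2, stepColA dA.2 p.2 p.1) := by
  refine ⟨fun k => ?_, fun k => ?_⟩
  · rw [valsC_append]
    exact step_dict _ dA.1 p.1 p.2 h.1 k
  · rw [valsR_append]
    exact step_dict _ dA.2 p.2 p.1 h.2 k

lemma inv_build (ps : List (Int × Int)) :
    InvAt ps
      (ps.foldl (fun d p => (stepColA d.1 p.1 p.2, stepColA d.2 p.2 p.1)) (PySem.Dict.empty, PySem.Dict.empty)) := by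
  induction ps using List.reverseRecOn with
  | nil =>
    constructor <;> intro k <;> simp [RelA, valsC, valsR, PySem.Dict.get?_empty]
  | append_singleton ps p ih =>
    simp only [List.foldl_append, List.foldl_cons, List.foldl_nil]
    exact step_preserves ps p _ ih

lemma RelA_extract {vs : List Int} {o : Option (List Int)}
    (h : RelA vs o) {a : Int} (ha : a ∈ vs) :
    ∃ l, o = some l ∧ l.Perm vs ∧ l.Pairwise (· ≤ ·) := by
  cases o with
  | none => simp [RelA] at h; subst h; simp at ha
  | some l => exact ⟨l, rfl, h.1, h.2⟩

-- an existential scan over the pairs equals an existential over the collected row values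
lemma any_row_iff (pairs : List (Int × Int)) (b : Int) (P : Int → Bool) :
    (pairs.any (fun q => q.2 == b && P q.1) = true) ↔ ∃ v ∈ valsR b pairs, P v = true := by
  simp only [List.any_eq_true, Bool.and_eq_true, beq_iff_eq, valsR, List.mem_map,
    List.mem_filter]
  constructor
  · rintro ⟨q, hq, h2, hP⟩; exact ⟨q.1, ⟨q, ⟨hq, by simp [h2]⟩, rfl⟩, hP⟩
  · rintro ⟨v, ⟨q, ⟨hq, h2⟩, rfl⟩, hP⟩; exact ⟨q, hq, by simpa using h2, hP⟩

lemma any_col_iff (pairs : List (Int × Int)) (a : Int) (P : Int → Bool) :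
    (pairs.any (fun q => q.1 == a && P q.2) = true) ↔ ∃ v ∈ valsC a pairs, P v = true := by
  simp only [List.any_eq_true, Bool.and_eq_true, beq_iff_eq, valsC, List.mem_map,
    List.mem_filter]
  constructor
  · rintro ⟨q, hq, h1, hP⟩; exact ⟨q.2, ⟨q, ⟨hq, by simp [h1]⟩, rfl⟩, hP⟩
  · rintro ⟨v, ⟨q, ⟨hq, h1⟩, rfl⟩, hP⟩; exact ⟨q, hq, by simpa using h1, hP⟩

-- in a sorted nonempty bucket, "some element strictly below c" iff "head strictly below c", given c ∈ l
lemma exists_lt_iff_head {l : List Int} {m c : Int} (hp : l.Pairwise (· ≤ ·))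
    (hh : l.head? = some m) : (∃ v ∈ l, v < c) ↔ m < c := by
  constructor
  · rintro ⟨v, hv, hlt⟩; exact lt_of_le_of_lt (pairwise_head_le hp hh v hv) hlt
  · intro h; exact ⟨m, head?_mem hh, h⟩

lemma exists_gt_iff_last {l : List Int} {M c : Int} (hp : l.Pairwise (· ≤ ·))
    (hh : l.getLast? = some M) : (∃ v ∈ l, c < v) ↔ c < M := by
  constructor
  · rintro ⟨v, hv, hlt⟩; exact lt_of_lt_of_le hlt (pairwise_getLast_ge hp hh v hv)
  · intro h; exact ⟨M, getLast?_mem hh, h⟩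

-- ===== VERDICT (by name: the statement is the Claim_ definition above) =====
theorem numIdleDrives_spec : Claim_equal_numIdleDrives := by
  intro x y _ hpre
  unfold Pre_numIdleDrives at hpre
  show numIdleDrives x y = numIdleDrives_alt x y
  unfold numIdleDrives numIdleDrives_alt
  dsimp only
  set pairs := x.zip y with hpairs
  set dA := pairs.foldl (fun d p => (stepColA d.1 p.1 p.2, stepColA d.2 p.2 p.1))
    ((PySem.Dict.empty : PySem.Dict Int (List Int)), (PySem.Dict.empty : PySem.Dict Int (List Int))) with hdA
  obtain ⟨hC, hR⟩ := inv_build pairs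
  -- pointwise: on a member of pairs A's "active" is the negation of B's "interior" test
  have hpt : ∀ p ∈ pairs, activeA dA.2 dA.1 p = !idleB pairs p.1 p.2 := by
    intro p hp
    have hmemR : p.1 ∈ valsR p.2 pairs :=
      List.mem_map.mpr ⟨p, List.mem_filter.mpr ⟨hp, by simp⟩, rfl⟩
    have hmemC : p.2 ∈ valsC p.1 pairs :=
      List.mem_map.mpr ⟨p, List.mem_filter.mpr ⟨hp, by simp⟩, rfl⟩
    obtain ⟨lr, hAr, hpermr, hpwr⟩ := RelA_extract (hR p.2) hmemR
    obtain ⟨lc, hAc, hpermc, hpwc⟩ := RelA_extract (hC p.1) hmemC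
    have hgAr : dA.2.getD p.2 [] = lr := PySem.Dict.getD_of_get?_eq_some _ _ hAr
    have hgAc : dA.1.getD p.1 [] = lc := PySem.Dict.getD_of_get?_eq_some _ _ hAc
    have hmr : p.1 ∈ lr := hpermr.mem_iff.mpr hmemR
    have hmc : p.2 ∈ lc := hpermc.mem_iff.mpr hmemC
    have hner : lr ≠ [] := fun h => by subst h; simp at hmr
    have hnec : lc ≠ [] := fun h => by subst h; simp at hmc
    obtain ⟨m, hhr⟩ : ∃ m, lr.head? = some m := by
      cases hk : lr with
      | nil => exact absurd hk hner
      | cons u t => exact ⟨u, by simp⟩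
    obtain ⟨M, htr⟩ : ∃ M, lr.getLast? = some M :=
      ⟨lr.getLast hner, List.getLast?_eq_some_getLast hner⟩
    obtain ⟨mc, hhc⟩ : ∃ m, lc.head? = some m := by
      cases hk : lc with
      | nil => exact absurd hk hnec
      | cons u t => exact ⟨u, by simp⟩
    obtain ⟨Mc, htc⟩ : ∃ M, lc.getLast? = some M :=
      ⟨lc.getLast hnec, List.getLast?_eq_some_getLast hnec⟩
    have h1 : m ≤ p.1 := pairwise_head_le hpwr hhr _ hmr
    have h2 : p.1 ≤ M := pairwise_getLast_ge hpwr htr _ hmr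
    have h3 : mc ≤ p.2 := pairwise_head_le hpwc hhc _ hmc
    have h4 : p.2 ≤ Mc := pairwise_getLast_ge hpwc htc _ hmc
    -- the four scans of B, characterised through the bucket extremes
    have e1 : (pairs.any (fun q => q.2 == p.2 && decide (q.1 < p.1))) = decide (m < p.1) := by
      rw [Bool.eq_iff_iff, decide_eq_true_iff,
        any_row_iff pairs p.2 (fun v => decide (v < p.1))]
      simp only [decide_eq_true_eq]
      constructor
      · rintro ⟨v, hv, hlt⟩
        exact (exists_lt_iff_head hpwr hhr).mp ⟨v, hpermr.mem_iff.mpr hv, hlt⟩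
      · intro h
        obtain ⟨v, hv, hlt⟩ := (exists_lt_iff_head hpwr hhr).mpr h
        exact ⟨v, hpermr.mem_iff.mp hv, hlt⟩
    have e2 : (pairs.any (fun q => q.2 == p.2 && decide (p.1 < q.1))) = decide (p.1 < M) := by
      rw [Bool.eq_iff_iff, decide_eq_true_iff,
        any_row_iff pairs p.2 (fun v => decide (p.1 < v))]
      simp only [decide_eq_true_eq]
      constructor
      · rintro ⟨v, hv, hlt⟩
        exact (exists_gt_iff_last hpwr htr).mp ⟨v, hpermr.mem_iff.mpr hv, hlt⟩
      · intro h
        obtain ⟨v, hv, hlt⟩ := (exists_gt_iff_last hpwr htr).mpr h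
        exact ⟨v, hpermr.mem_iff.mp hv, hlt⟩
    have e3 : (pairs.any (fun q => q.1 == p.1 && decide (q.2 < p.2))) = decide (mc < p.2) := by
      rw [Bool.eq_iff_iff, decide_eq_true_iff,
        any_col_iff pairs p.1 (fun v => decide (v < p.2))]
      simp only [decide_eq_true_eq]
      constructor
      · rintro ⟨v, hv, hlt⟩
        exact (exists_lt_iff_head hpwc hhc).mp ⟨v, hpermc.mem_iff.mpr hv, hlt⟩
      · intro h
        obtain ⟨v, hv, hlt⟩ := (exists_lt_iff_head hpwc hhc).mpr h
        exact ⟨v, hpermc.mem_iff.mp hv, hlt⟩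
    have e4 : (pairs.any (fun q => q.1 == p.1 && decide (p.2 < q.2))) = decide (p.2 < Mc) := by
      rw [Bool.eq_iff_iff, decide_eq_true_iff,
        any_col_iff pairs p.1 (fun v => decide (p.2 < v))]
      simp only [decide_eq_true_eq]
      constructor
      · rintro ⟨v, hv, hlt⟩
        exact (exists_gt_iff_last hpwc htc).mp ⟨v, hpermc.mem_iff.mpr hv, hlt⟩
      · intro h
        obtain ⟨v, hv, hlt⟩ := (exists_gt_iff_last hpwc htc).mpr h
        exact ⟨v, hpermc.mem_iff.mp hv, hlt⟩
    unfold activeA idleB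
    rw [hgAr, hgAc, pyGet_zero, pyGet_zero,
      PySem.List.pyGet?_neg_one, PySem.List.pyGet?_neg_one, hhr, htr, hhc, htc, e1, e2, e3, e4]
    rw [Bool.eq_iff_iff]
    simp only [Bool.or_eq_true, beq_iff_eq, Option.some.injEq, Bool.not_eq_true',
      Bool.and_eq_false_iff, decide_eq_false_iff_not, not_lt]
    constructor
    · intro h; omega
    · intro h; omega
  -- counting: len - #active = #idle
  have hlen : (pairs.length : Int) = (x.length : Int) := by
    rw [hpairs, List.length_zip, hpre]; simp
  rw [PySem.List.foldl_if_add_one (fun p => activeA dA.2 dA.1 p) pairs 0,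
    PySem.List.foldl_if_add_one (fun p : Int × Int => idleB pairs p.1 p.2) pairs 0]
  have hcnt : pairs.countP (fun p => activeA dA.2 dA.1 p)
      = pairs.countP (fun p => !idleB pairs p.1 p.2) :=
    List.countP_congr (fun p hp => by rw [hpt p hp])
  have hsplit := List.length_eq_countP_add_countP
    (fun p : Int × Int => idleB pairs p.1 p.2) (l := pairs)
  simp only [decide_not, Bool.decide_eq_true] at hsplit
  rw [hcnt]
  rw [← hlen]
  omega
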